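-- pv_equiv track=rewrite | github.com/emperorpickles/adventofcode2024 | day2/day2.py | levels_compare
-- ===== SOURCE A (Python) =====
-- def levels_compare(levels: list[int]) -> bool:
--     '''Checks if the provided levels only decrease or only increase by steps of 3 or less'''
--     # check if levels initially inc or dec or are same
--     if levels[0] == levels[1]:
--         return False
--     inc = levels[0] < levels[1]
--
--     for i, level in enumerate(levels[:-1]):
--         if inc and -3 <= level - levels[i+1] <= -1:
--             continue
--         if not inc and 1 <= level - levels[i+1] <= 3:
--             continue
--         return False
--     return True
-- ===== SOURCE B (Python) =====
-- def levels_compare(levels: list[int]) -> bool: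
--     '''Checks if the provided levels only decrease or only increase by steps of 3 or less'''
--     diffs = [b - a for a, b in zip(levels, levels[1:])]
--     lo, hi = min(diffs), max(diffs)
--     return (1 <= lo and hi <= 3) or (-3 <= lo and hi <= -1)
-- ===== Notes on version B (the rewrite author's own statement) =====
-- stated objective: simpler
-- what changed: B aggregates the adjacent-difference list into its minimum and maximum once and decides with a single range test on those two extremes, instead of A's direction flag fixed from the first pair and a per-element two-branch loop; this is correct because all diffs lie in [1,3] (resp. [-3,-1]) iff the min and max of the diff list do.
import Mathlib
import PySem

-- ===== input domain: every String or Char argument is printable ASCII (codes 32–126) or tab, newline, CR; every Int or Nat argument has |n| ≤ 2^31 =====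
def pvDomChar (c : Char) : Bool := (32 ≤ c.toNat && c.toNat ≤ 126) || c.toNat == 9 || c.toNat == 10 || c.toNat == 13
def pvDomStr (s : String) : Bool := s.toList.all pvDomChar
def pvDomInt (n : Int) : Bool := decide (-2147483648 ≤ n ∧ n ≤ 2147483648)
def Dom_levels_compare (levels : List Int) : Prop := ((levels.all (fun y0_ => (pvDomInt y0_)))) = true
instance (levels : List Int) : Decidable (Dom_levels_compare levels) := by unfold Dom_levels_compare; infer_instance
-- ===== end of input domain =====

-- B aggregates the adjacent-difference list into its min and max once and decides with one
-- range test on those two extremes, replacing A's direction flag and per-element branch loop;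
-- objective: simpler.


-- ===== PORT A =====
-- the for-loop over enumerate(levels[:-1]) with its two `continue` branches and early `return False`
def lcLoopA (levels : List Int) (inc : Bool) : List (Int × Int) → Bool
  | [] => true
  | (i, level) :: rest =>
    let nxt := PySem.List.pyGetD levels (i + 1) 0
    if inc && (decide (-3 ≤ level - nxt) && decide (level - nxt ≤ -1)) then
      lcLoopA levels inc rest
    else if !inc && (decide (1 ≤ level - nxt) && decide (level - nxt ≤ 3)) then
      lcLoopA levels inc rest
    else
      false

def levels_compare (levels : List Int) : Bool :=
  -- levels[0], levels[1]: IndexError on lists of length < 2 is excluded by Pre_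
  let a0 := PySem.List.pyGetD levels 0 0
  let a1 := PySem.List.pyGetD levels 1 0
  if a0 == a1 then false
  else
    let inc := decide (a0 < a1)
    lcLoopA levels inc (PySem.List.enumerate (PySem.List.slice levels none (some (-1))))

-- ===== PORT B =====
def levels_compare_alt (levels : List Int) : Bool :=
  let diffs := (levels.zip (PySem.List.slice levels (some 1) none)).map (fun p => p.2 - p.1)
  -- min(diffs)/max(diffs): Python raises ValueError on an empty diffs list (length < 2), excluded by Pre_
  match PySem.List.min? diffs (fun x => x), PySem.List.max? diffs (fun x => x) with
  | some lo, some hi =>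
      (decide (1 ≤ lo) && decide (hi ≤ 3)) || (decide (-3 ≤ lo) && decide (hi ≤ -1))
  | _, _ => false

-- ===== PRECONDITION & SPEC =====
-- A indexes levels[1], raising IndexError for lists of length < 2 (B's min/max raise ValueError there); exactly those are excluded.
def Pre_levels_compare (levels : List Int) : Prop := 2 ≤ levels.length
instance (levels : List Int) : Decidable (Pre_levels_compare levels) := by unfold Pre_levels_compare; infer_instance
def pvWitness_levels_compare : List Int := [1, 2, 4]

def Spec_levels_compare (levels : List Int) (out : Bool) : Prop := out = levels_compare_alt levels
instance (levels : List Int) (out : Bool) : Decidable (Spec_levels_compare levels out) := by unfold Spec_levels_compare; infer_instance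

-- ===== CLAIM (what is proved, stated in full; the proofs are below) =====
def Claim_equal_levels_compare : Prop := ∀ (levels : List Int), Dom_levels_compare levels → Pre_levels_compare levels → Spec_levels_compare levels (levels_compare levels)

-- ===== LEMMAS AND PROOFS =====

-- A's loop over enumerate(levels[:-1]) starting at index k equals an `all` over the zipped suffix pairs.
lemma lcLoopA_eq (levels : List Int) (inc : Bool) :
    ∀ k : Nat,
      lcLoopA levels inc (PySem.List.enumerate (levels.dropLast.drop k) k) =
      ((levels.drop k).zip (levels.drop (k + 1))).all
        (fun p =>
          if inc then decide (-3 ≤ p.1 - p.2) && decide (p.1 - p.2 ≤ -1)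
          else decide (1 ≤ p.1 - p.2) && decide (p.1 - p.2 ≤ 3)) := by
  intro k
  induction hm : levels.dropLast.length - k generalizing k with
  | zero =>
    have hk : levels.dropLast.length ≤ k := by omega
    have h1 : levels.dropLast.drop k = [] := List.drop_eq_nil_of_le hk
    have h2 : levels.drop (k + 1) = [] := by
      apply List.drop_eq_nil_of_le
      simp [List.length_dropLast] at hk ⊢
      omega
    simp [h1, h2, lcLoopA]
  | succ m ih =>
    have hk : k < levels.dropLast.length := by omega
    have hk' : k < levels.length := by
      simp [List.length_dropLast] at hk; omega
    have hk1 : k + 1 < levels.length := by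
      simp [List.length_dropLast] at hk; omega
    have h1 : levels.dropLast.drop k = levels[k] :: levels.dropLast.drop (k + 1) := by
      rw [List.drop_eq_getElem_cons hk, List.getElem_dropLast]
    have h2 : levels.drop k = levels[k] :: levels.drop (k + 1) :=
      List.drop_eq_getElem_cons hk'
    have h3 : levels.drop (k + 1) = levels[k + 1] :: levels.drop (k + 2) :=
      List.drop_eq_getElem_cons hk1
    have hget : PySem.List.pyGetD levels ((k : Int) + 1) 0 = levels[k + 1] := by
      have h0 : (0 : Int) ≤ (k : Int) + 1 := by positivity
      have hlt : (k : Int) + 1 < (levels.length : Int) := by exact_mod_cast hk1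
      rw [PySem.List.pyGetD_eq_getElem levels 0 h0 hlt]
      simp [show ((k : Int) + 1).toNat = k + 1 by omega]
    rw [h1, PySem.List.enumerate_cons, h2]
    conv_rhs => rw [h3]
    rw [List.zip_cons_cons, List.all_cons]
    simp only [lcLoopA, hget]
    have ihk := ih (k + 1) (by omega)
    rw [show (k : Int) + 1 = ((k + 1 : Nat) : Int) by push_cast; ring] at *
    cases inc with
    | true =>
      simp only [Bool.not_true, Bool.false_and, Bool.false_eq_true, if_false, Bool.true_and,
        if_true]
      rw [ihk]
      cases hb : (decide (-3 ≤ levels[k] - levels[k + 1]) && decide (levels[k] - levels[k + 1] ≤ -1)) <;>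
        simp
    | false =>
      simp only [Bool.not_false, Bool.false_and, Bool.false_eq_true, if_false, Bool.true_and]
      rw [ihk]
      cases hb : (decide (1 ≤ levels[k] - levels[k + 1]) && decide (levels[k] - levels[k + 1] ≤ 3)) <;>
        simp

-- min/max bounds of a nonempty list decide the uniform range test.
lemma minmax_all (l : List Int) (lo hi p q : Int)
    (hmin : PySem.List.min? l (fun x => x) = some lo)
    (hmax : PySem.List.max? l (fun x => x) = some hi) :
    (decide (p ≤ lo) && decide (hi ≤ q)) = l.all (fun d => decide (p ≤ d) && decide (d ≤ q)) := by
  by_cases h : p ≤ lo ∧ hi ≤ q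
  · have hall : l.all (fun d => decide (p ≤ d) && decide (d ≤ q)) = true := by
      rw [List.all_eq_true]
      intro d hd
      have h1 := PySem.List.min?_isMin hmin d hd
      have h2 := PySem.List.max?_isMax hmax d hd
      simp only [Bool.and_eq_true, decide_eq_true_eq]
      omega
    rw [hall]
    simp [h.1, h.2]
  · have : ¬ (p ≤ lo) ∨ ¬ (hi ≤ q) := by tauto
    have hnall : l.all (fun d => decide (p ≤ d) && decide (d ≤ q)) = false := by
      rw [List.all_eq_false]
      rcases this with h' | h'
      · exact ⟨lo, PySem.List.min?_mem hmin, by simp [h']⟩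
      · exact ⟨hi, PySem.List.max?_mem hmax, by simp; omega⟩
    rw [hnall]
    rcases this with h' | h' <;> simp [h']

-- the two direction predicates are pointwise flips of each other
lemma flip_bounds (a b : Int) :
    (decide (-3 ≤ a - b) && decide (a - b ≤ -1)) = (decide (1 ≤ b - a) && decide (b - a ≤ 3)) := by
  by_cases h1 : 1 ≤ b - a <;> by_cases h2 : b - a ≤ 3 <;> simp [h1, h2] <;> omega

lemma all_flip (l : List (Int × Int)) :
    (l.all fun p => decide (-3 ≤ p.1 - p.2) && decide (p.1 - p.2 ≤ -1)) =
    (l.all fun p => decide (1 ≤ p.2 - p.1) && decide (p.2 - p.1 ≤ 3)) := by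
  induction l with
  | nil => rfl
  | cons x t ih => rw [List.all_cons, List.all_cons, ih, flip_bounds x.1 x.2]

lemma all_flip2 (l : List (Int × Int)) :
    (l.all fun p => decide (1 ≤ p.1 - p.2) && decide (p.1 - p.2 ≤ 3)) =
    (l.all fun p => decide (-3 ≤ p.2 - p.1) && decide (p.2 - p.1 ≤ -1)) := by
  induction l with
  | nil => rfl
  | cons x t ih => rw [List.all_cons, List.all_cons, ih, flip_bounds x.2 x.1]

-- ===== VERDICT (by name: the statement is the Claim_ definition above) =====
theorem levels_compare_spec : Claim_equal_levels_compare := by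
  intro levels _ hpre
  obtain ⟨a, b, rest, rfl⟩ : ∃ a b rest, levels = a :: b :: rest := by
    match levels, hpre with
    | a :: b :: rest, _ => exact ⟨a, b, rest, rfl⟩
    | [], hpre => simp [Pre_levels_compare] at hpre
    | [a], hpre => simp [Pre_levels_compare] at hpre
  unfold Spec_levels_compare levels_compare levels_compare_alt
  simp only [PySem.List.pyGetD_zero_cons, PySem.List.slice_to_neg_one, PySem.List.slice_from_one,
    List.tail_cons]
  have e1 : PySem.List.pyGetD (a :: b :: rest) 1 0 = b := by
    simp [pysem]
  rw [e1]
  -- the diff list is nonempty: name its min and max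
  set diffs := (((a :: b :: rest).zip (b :: rest)).map (fun p => p.2 - p.1)) with hdiffs
  have hhead : diffs = (b - a) :: ((b :: rest).zip rest).map (fun p => p.2 - p.1) := by
    simp [hdiffs]
  obtain ⟨lo, hlo⟩ : ∃ lo, PySem.List.min? diffs (fun x => x) = some lo := by
    cases h : PySem.List.min? diffs (fun x => x) with
    | some lo => exact ⟨lo, rfl⟩
    | none => rw [PySem.List.min?_eq_none_iff] at h; rw [hhead] at h; simp at h
  obtain ⟨hi, hhi⟩ : ∃ hi, PySem.List.max? diffs (fun x => x) = some hi := by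
    cases h : PySem.List.max? diffs (fun x => x) with
    | some hi => exact ⟨hi, rfl⟩
    | none => rw [PySem.List.max?_eq_none_iff] at h; rw [hhead] at h; simp at h
  simp only [hlo, hhi]
  -- B's two range tests become two `all`s over diffs
  rw [minmax_all diffs lo hi 1 3 hlo hhi, minmax_all diffs lo hi (-3) (-1) hlo hhi]
  -- `all` over diffs = `all` over the zip pairs
  have hallmap : ∀ (p q : Int),
      diffs.all (fun d => decide (p ≤ d) && decide (d ≤ q)) =
      ((a :: b :: rest).zip (b :: rest)).all (fun t => decide (p ≤ t.2 - t.1) && decide (t.2 - t.1 ≤ q)) := by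
    intro p q
    rw [hdiffs, List.all_map]
    rfl
  by_cases hab : a = b
  · subst hab
    rw [if_pos (by simp)]
    rw [hallmap 1 3, hallmap (-3) (-1)]
    simp only [List.zip_cons_cons, List.all_cons]
    simp
  · rw [if_neg (by simp [hab])]
    have hA := lcLoopA_eq (a :: b :: rest) (decide (a < b)) 0
    simp only [List.drop_zero, Nat.cast_zero, zero_add, List.drop_one, List.tail_cons] at hA
    rw [hA]
    rw [hallmap 1 3, hallmap (-3) (-1)]
    by_cases hlt : a < b
    · -- increasing start: A's predicate flips to B's [1,3] test; the [-3,-1] `all` fails at the head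
      simp only [hlt, decide_true, if_true]
      rw [all_flip]
      have hdecF : (((a :: b :: rest).zip (b :: rest)).all
          (fun t => decide (-3 ≤ t.2 - t.1) && decide (t.2 - t.1 ≤ -1))) = false := by
        simp only [List.zip_cons_cons, List.all_cons]
        have h1 : ¬ (b - a ≤ -1) := by omega
        simp [h1]
      rw [hdecF, Bool.or_false]
    · -- decreasing (or equal handled above): flip to the [-3,-1] test; the [1,3] `all` fails at the head
      simp only [hlt, decide_false, Bool.false_eq_true, if_false]
      rw [all_flip2]
      have hincF : (((a :: b :: rest).zip (b :: rest)).all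
          (fun t => decide (1 ≤ t.2 - t.1) && decide (t.2 - t.1 ≤ 3))) = false := by
        simp only [List.zip_cons_cons, List.all_cons]
        have h1 : ¬ (1 ≤ b - a) := by omega
        simp [h1]
      rw [hincF, Bool.false_or]
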